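-- pv_equiv track=rewrite | github.com/jpata/cms-reco-tools | validateJP.py | filter_histograms_skip
-- ===== SOURCE A (Python) =====
-- def filter_histograms_skip(histograms, skips):
--     histograms_filtered = []
--     for histogram in histograms:
--         skipped = False
--         for skip in skips:
--             if skip in histogram:
--                 skipped = True
--                 break
--         if not skipped:
--             histograms_filtered.append(histogram)
--     return histograms_filtered
-- ===== SOURCE B (Python) =====
-- def filter_histograms_skip(histograms, skips):
--     # Loop inversion: fold over the skip patterns, narrowing the surviving
--     # histogram list once per pattern; stop when nothing survives and apply
--     # each distinct pattern only once.
--     remaining = list(histograms)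
--     seen = set()
--     for skip in skips:
--         if not remaining:
--             break
--         if skip in seen:
--             continue
--         seen.add(skip)
--         remaining = [h for h in remaining if skip not in h]
--     return remaining
-- ===== Notes on version B (the rewrite author's own statement) =====
-- stated objective: alternative
-- what changed: Loops are inverted: instead of scanning all skips for each histogram with a break flag, B folds over the skip patterns, filtering the ever-shrinking survivor list once per distinct pattern (a seen-set drops duplicate patterns, and the fold stops as soon as no histogram survives).
import Mathlib
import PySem

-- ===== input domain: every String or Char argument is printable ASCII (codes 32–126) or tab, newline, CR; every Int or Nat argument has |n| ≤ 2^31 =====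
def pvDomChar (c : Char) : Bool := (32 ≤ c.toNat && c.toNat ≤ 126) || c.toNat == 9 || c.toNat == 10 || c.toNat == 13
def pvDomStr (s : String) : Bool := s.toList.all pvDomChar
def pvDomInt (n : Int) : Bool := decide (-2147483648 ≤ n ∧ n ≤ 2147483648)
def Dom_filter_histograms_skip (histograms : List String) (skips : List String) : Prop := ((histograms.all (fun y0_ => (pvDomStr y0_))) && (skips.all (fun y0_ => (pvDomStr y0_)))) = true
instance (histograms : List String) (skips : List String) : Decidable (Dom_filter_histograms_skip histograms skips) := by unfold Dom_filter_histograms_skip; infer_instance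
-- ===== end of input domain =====

-- B inverts A's loops: it folds over the skip patterns, filtering the surviving
-- histogram list once per distinct pattern and stopping when none survive.
-- ===== PORT A =====
-- inner loop of A: 'for skip in skips: if skip in histogram: skipped = True; break'
def pvSkipped (skips : List String) (histogram : String) : Bool :=
  match skips with
  | [] => false
  | skip :: rest => if PySem.Str.isIn skip histogram then true else pvSkipped rest histogram

def filter_histograms_skip (histograms : List String) (skips : List String) : List String :=
  histograms.foldl (fun histograms_filtered histogram =>
    if !pvSkipped skips histogram then histograms_filtered ++ [histogram] else histograms_filtered) []

-- ===== PORT B =====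
-- B: fold over the skip patterns, filtering the surviving list once per distinct
-- pattern; break when nothing survives, skip patterns already seen
def pvGoB (remaining : List String) (seen : PySem.Set String) (skips : List String) : List String :=
  match skips with
  | [] => remaining
  | skip :: rest =>
      if remaining = [] then remaining
      else if PySem.Set.contains seen skip then pvGoB remaining seen rest
      else pvGoB (remaining.filter (fun h => !PySem.Str.isIn skip h)) (PySem.Set.add seen skip) rest

def filter_histograms_skip_alt (histograms : List String) (skips : List String) : List String :=
  pvGoB histograms PySem.Set.empty skips

-- ===== PRECONDITION & SPEC =====
def Spec_filter_histograms_skip (histograms : List String) (skips : List String) (out : List String) : Prop := out = filter_histograms_skip_alt histograms skips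
instance (histograms : List String) (skips : List String) (out : List String) : Decidable (Spec_filter_histograms_skip histograms skips out) := by unfold Spec_filter_histograms_skip; infer_instance

-- ===== CLAIM (what is proved, stated in full; the proofs are below) =====
def Claim_equal_filter_histograms_skip : Prop := ∀ (histograms : List String) (skips : List String), Dom_filter_histograms_skip histograms skips → Spec_filter_histograms_skip histograms skips (filter_histograms_skip histograms skips)

-- ===== LEMMAS AND PROOFS =====

-- ===== VERDICT (by name: the statement is the Claim_ definition above) =====
lemma pvSkipped_eq_any (skips : List String) (h : String) :
    pvSkipped skips h = skips.any (fun s => PySem.Str.isIn s h) := by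
  induction skips with
  | nil => rfl
  | cons s rest ih => cases hh : PySem.Str.isIn s h <;> simp [pvSkipped, PySem.Str.isIn_eq, ih]

lemma portA_eq_filter (histograms skips : List String) :
    filter_histograms_skip histograms skips
      = histograms.filter (fun h => !pvSkipped skips h) := by
  unfold filter_histograms_skip
  rw [PySem.List.foldl_append_if]
  simp

-- invariant: every pattern in `seen` has already been filtered out of `remaining`
lemma pvGoB_eq_filter : ∀ (skips : List String) (seen : PySem.Set String) (remaining : List String),
    (∀ s ∈ seen, ∀ h ∈ remaining, PySem.Str.isIn s h = false) →
    pvGoB remaining seen skips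
      = remaining.filter (fun h => !(skips.any (fun s => PySem.Str.isIn s h))) := by
  intro skips
  induction skips with
  | nil => intro seen remaining _; simp [pvGoB]
  | cons skip rest ih =>
      intro seen remaining hinv
      by_cases hrem : remaining = []
      · simp [pvGoB, hrem]
      · by_cases hseen : PySem.Set.contains seen skip = true
        · have hskip : ∀ h ∈ remaining, PySem.Str.isIn skip h = false := by
            intro h hh
            exact hinv skip (by simpa using (List.contains_iff_mem).1 hseen) h hh
          rw [pvGoB, if_neg hrem, if_pos hseen, ih seen remaining hinv]
          apply List.filter_congr
          intro h hh
          have hx := hskip h hh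
          simp only [PySem.Str.isIn_eq] at hx
          simp [List.any_cons, hx]
        · rw [pvGoB, if_neg hrem, if_neg hseen]
          rw [ih (PySem.Set.add seen skip) (remaining.filter (fun h => !PySem.Str.isIn skip h))]
          · rw [List.filter_filter]
            apply List.filter_congr
            intro h _
            cases hx : PySem.Chars.isIn skip.toList h.toList <;>
              simp [PySem.Str.isIn_eq, hx, Bool.and_comm]
          · intro s hs h hh
            rcases List.mem_filter.1 hh with ⟨hhr, hcond⟩
            rcases (PySem.Set.mem_add seen skip s).1 hs with h1 | h1
            · exact hinv s h1 h hhr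
            · subst h1; simpa using hcond

lemma portB_eq_filter (skips : List String) (hs : List String) :
    filter_histograms_skip_alt hs skips
      = hs.filter (fun h => !(skips.any (fun s => PySem.Str.isIn s h))) := by
  unfold filter_histograms_skip_alt
  exact pvGoB_eq_filter skips PySem.Set.empty hs (by intro s hs; simp [PySem.Set.empty] at hs)

theorem filter_histograms_skip_spec : Claim_equal_filter_histograms_skip := by
  intro histograms skips _
  unfold Spec_filter_histograms_skip
  rw [portA_eq_filter, portB_eq_filter]
  apply List.filter_congr
  intro h _
  rw [pvSkipped_eq_any]
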